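-- pv_equiv track=rewrite | github.com/UHD-Botz/UHD-Tools-Bot | utils/anti_nsfw.py | is_nsfw
-- ===== SOURCE A (Python) =====
-- BAD_WORDS = [
--     "xxx", "porn", "nude", "sex", "onlyfans", "leak",
--     "bhabi", "desi", "mms", "nsfw", "brazzers", "ullu",
--     "kullu", "hot", "naked", "chudai"
-- ]
--
-- def is_nsfw(filename):
--     if not filename:
--         return False
--
--     text = filename.lower()
--
--     # Check for bad words in filename
--     for word in BAD_WORDS:
--         if word in text:
--             return True
--
--     return False
-- ===== SOURCE B (Python) =====
-- BAD_WORDS = [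
--     "xxx", "porn", "nude", "sex", "onlyfans", "leak",
--     "bhabi", "desi", "mms", "nsfw", "brazzers", "ullu",
--     "kullu", "hot", "naked", "chudai"
-- ]
--
-- _WORD_SET = set(BAD_WORDS)
-- _LENS = sorted(set(len(w) for w in BAD_WORDS))
--
-- def is_nsfw(filename):
--     if not filename:
--         return False
--     text = filename.lower()
--     n = len(text)
--     for L in _LENS:
--         for i in range(n - L + 1):
--             if text[i:i + L] in _WORD_SET:
--                 return True
--     return False
-- ===== Notes on version B (the rewrite author's own statement) =====
-- stated objective: alternative
-- what changed: Replaced per-word substring searches with a sliding-window hash lookup: for each distinct bad-word length L, slide a window of length L over the text and test each window slice for membership in a precomputed set of the bad words.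
import Mathlib
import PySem

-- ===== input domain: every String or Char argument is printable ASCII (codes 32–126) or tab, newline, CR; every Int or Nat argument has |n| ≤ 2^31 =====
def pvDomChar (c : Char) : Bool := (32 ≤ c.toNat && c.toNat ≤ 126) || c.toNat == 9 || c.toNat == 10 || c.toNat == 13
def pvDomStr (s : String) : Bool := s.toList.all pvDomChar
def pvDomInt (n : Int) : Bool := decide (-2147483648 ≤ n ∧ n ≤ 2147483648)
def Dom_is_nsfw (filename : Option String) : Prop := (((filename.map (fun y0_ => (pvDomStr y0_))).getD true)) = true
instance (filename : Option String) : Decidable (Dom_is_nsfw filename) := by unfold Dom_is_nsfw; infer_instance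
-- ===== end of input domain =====

-- B replaces A's per-word substring searches by a sliding-window set lookup: for each distinct
-- bad-word length, slide a window of that length over the text and test membership in the word set
-- (alternative structure, same asymptotic cost).


def pvBadWords : List String :=
  ["xxx", "porn", "nude", "sex", "onlyfans", "leak",
   "bhabi", "desi", "mms", "nsfw", "brazzers", "ullu",
   "kullu", "hot", "naked", "chudai"]

-- ===== PORT A =====
-- for-loop with early `return True` = List.any over the word list; `word in text` = PySem.Str.isIn
def is_nsfw (filename : Option String) : Bool :=
  match filename with
  | none => false
  | some s =>
    if s = "" then false
    else
      let text := PySem.Str.lower s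
      pvBadWords.any (fun word => PySem.Str.isIn word text)

-- ===== PORT B =====
-- module-level constants of Source B: _WORD_SET = set(BAD_WORDS), _LENS = sorted(set of word lengths)
def pvWordSet : PySem.Set String := PySem.Set.ofList pvBadWords
def pvWordLens : List Nat :=
  PySem.List.sorted (PySem.Set.ofList (pvBadWords.map String.length)) (fun x => x) false

-- nested for-loops over lengths and window starts; `text[i:i+L]` on the lowered text is
-- (text.drop i).take L (i, L ≥ 0 so Python's slice is exactly drop/take); range(n - L + 1)
-- is List.range (n + 1 - L) (Nat truncation = Python's empty range for negative bounds);
-- `slice in _WORD_SET` compares the slice with each set element.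
def is_nsfw_alt (filename : Option String) : Bool :=
  match filename with
  | none => false
  | some s =>
    if s = "" then false
    else
      let text := (PySem.Str.lower s).toList
      let n := text.length
      pvWordLens.any (fun L =>
        (List.range (n + 1 - L)).any (fun i =>
          pvWordSet.any (fun w => (text.drop i).take L == w.toList)))

-- ===== PRECONDITION & SPEC =====
def Spec_is_nsfw (filename : Option String) (out : Bool) : Prop := out = is_nsfw_alt filename
instance (filename : Option String) (out : Bool) : Decidable (Spec_is_nsfw filename out) := by unfold Spec_is_nsfw; infer_instance

-- ===== CLAIM (what is proved, stated in full; the proofs are below) =====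
def Claim_equal_is_nsfw : Prop := ∀ (filename : Option String), Dom_is_nsfw filename → Spec_is_nsfw filename (is_nsfw filename)

-- ===== LEMMAS AND PROOFS =====

theorem pvLens_complete : ∀ w ∈ pvBadWords, w.length ∈ pvWordLens := by decide

-- a list is an infix exactly when it appears as a window slice (drop i, take |w|)
theorem pv_infix_iff_window (w l : List Char) :
    w <:+: l ↔ ∃ i, i + w.length ≤ l.length ∧ (l.drop i).take w.length = w := by
  constructor
  · rintro ⟨pre, suf, rfl⟩
    refine ⟨pre.length, by simp [List.length_append], ?_⟩
    simp
  · rintro ⟨i, _, h⟩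
    exact (h ▸ (List.take_prefix _ _).isInfix).trans (List.drop_suffix i l).isInfix

-- ===== VERDICT (by name: the statement is the Claim_ definition above) =====
theorem is_nsfw_spec : Claim_equal_is_nsfw := by
  intro filename _
  unfold Spec_is_nsfw
  cases filename with
  | none => rfl
  | some s =>
    simp only [is_nsfw, is_nsfw_alt]
    split_ifs with h
    · rfl
    · rw [Bool.eq_iff_iff]
      simp only [List.any_eq_true, List.mem_range, beq_iff_eq]
      constructor
      · rintro ⟨w, hw, hin⟩
        rw [PySem.Str.isIn_iff_infix, pv_infix_iff_window] at hin
        obtain ⟨i, hle, heq⟩ := hin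
        have hlw : w.toList.length = w.length := by simp
        refine ⟨w.length, pvLens_complete w hw, i, by omega, w, ?_, heq⟩
        simpa [pvWordSet, PySem.Set.mem_ofList] using hw
      · rintro ⟨L, _, i, _, w, hw, heq⟩
        have hwmem : w ∈ pvBadWords := by
          simpa [pvWordSet, PySem.Set.mem_ofList] using hw
        refine ⟨w, hwmem, ?_⟩
        rw [PySem.Str.isIn_iff_infix]
        exact (heq ▸ (List.take_prefix _ _).isInfix).trans
          (List.drop_suffix i _).isInfix
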